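-- pv_equiv track=rewrite | github.com/AndresCaceresDio/chs-course-catalog | acronymaker/acronymaker.py | generate_acronyms_heavy
-- ===== SOURCE A (Python) =====
-- from itertools import product, permutations, islice
--
-- def is_word(word, spell):
--     word_lower = word.lower()
--     is_valid = word_lower in spell
--     return is_valid
--
-- def generate_acronym(acronym_tuple, revised_synonyms, spell):
--     acronym = ''.join(word[0].upper() for word in acronym_tuple)
--     if is_word(acronym, spell):
--         context = ['{} (synonym for {})'.format(word, syn_list[-1]) if word in syn_list and word != syn_list[-1] else word
--                      for word in acronym_tuple for syn_list in revised_synonyms if word in syn_list]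
--         return f"{acronym} [{', '.join(context)}]"
--     return None
--
-- def generate_acronyms_heavy(revised_synonyms, ordered='no', offset=0, limit=30, spell=None):
--     acronym_generator = islice(product(*revised_synonyms), offset, None) if ordered == "yes" else islice((
--                         prod for perm in permutations(revised_synonyms) for prod in product(*perm)), offset, offset+1000000)
--     valid_acronyms = []
--     next_offset=offset
--     for acronym_tuple in acronym_generator:
--         next_offset+=1
--         acronym_result = generate_acronym(acronym_tuple, revised_synonyms, spell)
--         if acronym_result:
--             valid_acronyms.append(acronym_result)
--             if len(valid_acronyms) >= limit:
--                 break
--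
--     return valid_acronyms, next_offset
-- ===== SOURCE B (Python) =====
-- from itertools import permutations
--
-- def generate_acronyms_heavy(revised_synonyms, ordered='no', offset=0, limit=30, spell=None):
--     # Prefix-pruned DFS over the synonym product: positions are computed by
--     # mixed-radix arithmetic, subtrees whose first-letter prefix cannot extend
--     # to a dictionary word are skipped wholesale.
--     k = len(revised_synonyms)
--     target = limit if limit > 1 else 1
--
--     prefixes = set()
--     for w in spell:
--         if len(w) == k:
--             for i in range(k + 1):
--                 prefixes.add(w[:i])
--
--     def block(groups):
--         t = 1
--         for g in groups:
--             t *= len(g)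
--         return t
--
--     def render(acronym, words):
--         context = []
--         for word in words:
--             for syn_list in revised_synonyms:
--                 if word in syn_list:
--                     if word != syn_list[-1]:
--                         context.append('{} (synonym for {})'.format(word, syn_list[-1]))
--                     else:
--                         context.append(word)
--         return "{} [{}]".format(acronym, ', '.join(context))
--
--     def dfs(groups, base, lo, hi, prefix, words, acc):
--         if len(acc) >= target or prefix.lower() not in prefixes:
--             return acc
--         if not groups:
--             if lo <= base < hi:
--                 acc = acc + [(base, render(prefix, words))]
--             return acc
--         g = groups[0]
--         rest = groups[1:]
--         step = block(rest)
--         for j, w in enumerate(g):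
--             acc = dfs(rest, base + j * step, lo, hi,
--                       prefix + w[0].upper(), words + [w], acc)
--         return acc
--
--     total = block(revised_synonyms)
--     acc = []
--     if total == 0:
--         return [], offset  # no tuples at all
--     if ordered == "yes":
--         acc = dfs(revised_synonyms, 0, offset, total, "", [], acc)
--         consumed = total - offset if total > offset else 0
--     else:
--         hi = offset + 1000000
--         nperms = 1
--         for i in range(2, k + 1):
--             nperms *= i
--         base = 0
--         for perm in permutations(revised_synonyms):
--             if len(acc) >= target or base >= hi:
--                 break
--             acc = dfs(list(perm), base, offset, hi, "", [], acc)
--             base += total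
--         capped = nperms * total
--         if capped > hi:
--             capped = hi
--         consumed = capped - offset if capped > offset else 0
--     if len(acc) >= target:
--         return [s for _, s in acc], acc[-1][0] + 1
--     return [s for _, s in acc], offset + consumed
-- ===== Notes on version B (the rewrite author's own statement) =====
-- stated objective: faster
-- what changed: A scans every tuple of the (permuted) synonym product one by one; B indexes the spell words' prefixes once and runs a prefix-pruned DFS over the product tree, skipping whole subtrees whose first-letter prefix cannot spell a word and recovering A's stream positions (next_offset) by mixed-radix arithmetic instead of counting consumed tuples.
-- outside the precondition, e.g. on generate_acronyms_heavy([['a', '']], 'no', 0, 1, {'a'}): A returns (['A [a (synonym for )]'], 1), B raises IndexError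
import Mathlib
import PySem

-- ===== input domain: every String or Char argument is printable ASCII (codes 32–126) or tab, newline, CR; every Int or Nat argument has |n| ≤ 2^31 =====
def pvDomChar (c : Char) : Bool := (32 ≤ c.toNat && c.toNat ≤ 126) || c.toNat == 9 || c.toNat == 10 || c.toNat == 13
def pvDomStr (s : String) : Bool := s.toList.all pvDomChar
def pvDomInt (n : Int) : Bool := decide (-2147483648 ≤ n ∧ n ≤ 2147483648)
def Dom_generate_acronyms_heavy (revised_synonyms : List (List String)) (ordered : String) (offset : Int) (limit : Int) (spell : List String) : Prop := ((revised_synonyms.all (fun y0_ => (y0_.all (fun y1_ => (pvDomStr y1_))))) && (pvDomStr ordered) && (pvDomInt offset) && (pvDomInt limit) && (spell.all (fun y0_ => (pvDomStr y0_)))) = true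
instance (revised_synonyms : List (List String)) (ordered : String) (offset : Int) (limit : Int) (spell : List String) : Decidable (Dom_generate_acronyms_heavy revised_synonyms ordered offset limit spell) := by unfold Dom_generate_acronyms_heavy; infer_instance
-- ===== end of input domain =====

-- B replaces A's brute-force scan of the (permuted) synonym product by a prefix-pruned
-- DFS with mixed-radix position arithmetic; measurably faster when few acronyms spell words.

-- ===== PORT A =====

-- word[0].upper(); the ' ' default is unreachable under Pre_ (Python raises IndexError on "")
def pvHeadUpper (w : String) : Char :=
  match w.toList with
  | c :: _ => PySem.Chars.upperChar c
  | [] => ' '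

-- itertools.product(*groups), leftmost factor slowest (Python order)
def pvProduct : List (List String) → List (List String)
  | [] => [[]]
  | g :: gs => g.flatMap (fun w => (pvProduct gs).map (fun t => w :: t))

-- the context list + final f-string, identical in A's generate_acronym and Source B's render
def pvRender (revised_synonyms : List (List String)) (acr : String) (t : List String) : String :=
  let context : List String := t.flatMap (fun word =>
    revised_synonyms.filterMap (fun syn =>
      if word ∈ syn then
        some (if word ∈ syn ∧ word ≠ syn.getLastD "" then
                String.ofList (word.toList ++ " (synonym for ".toList ++ (syn.getLastD "").toList ++ [')'])
              else word)
      else none))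
  String.ofList (acr.toList ++ " [".toList ++ (PySem.Str.join ", " context).toList ++ [']'])

-- generate_acronym: none = Python's None (the returned string is never falsy otherwise)
def pvGenAcronym (revised_synonyms : List (List String)) (spell : List String) (t : List String) : Option String :=
  let acr : List Char := t.map pvHeadUpper
  if String.ofList (PySem.Chars.lower acr) ∈ spell then
    some (pvRender revised_synonyms (String.ofList acr) t)
  else none

-- the for-loop with the `break`
def pvLoopA (revised_synonyms : List (List String)) (spell : List String) (limit : Int) :
    List (List String) → List String → Int → List String × Int
  | [], acc, k => (acc, k)
  | t :: ts, acc, k =>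
    match pvGenAcronym revised_synonyms spell t with
    | some r =>
      let acc' := acc ++ [r]
      if limit ≤ (acc'.length : Int) then (acc', k + 1)
      else pvLoopA revised_synonyms spell limit ts acc' (k + 1)
    | none => pvLoopA revised_synonyms spell limit ts acc (k + 1)

def generate_acronyms_heavy (revised_synonyms : List (List String)) (ordered : String) (offset : Int) (limit : Int) (spell : List String) : List String × Int :=
  -- islice(product(...), offset, None)  /  islice(perm-chain, offset, offset+1000000)
  let stream : List (List String) :=
    if ordered = "yes" then (pvProduct revised_synonyms).drop offset.toNat
    else (((PySem.List.permutations revised_synonyms revised_synonyms.length).flatMap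
            (fun perm => pvProduct perm)).drop offset.toNat).take 1000000
  pvLoopA revised_synonyms spell limit stream [] offset

-- ===== PORT B =====

-- product of the group sizes (Source B's block())
def pvBlock (groups : List (List String)) : Int :=
  groups.foldl (fun t g => t * (g.length : Int)) 1

-- all prefixes w[:i] (= take i) of the spell words of length k (Source B's `prefixes` set)
def pvPrefixes (spell : List String) (k : Nat) : PySem.Set String :=
  spell.foldl (fun s w =>
    if w.toList.length = k then
      (List.range (k + 1)).foldl (fun s i => PySem.Set.add s (String.ofList (w.toList.take i))) s
    else s) PySem.Set.empty

-- Source B's dfs: prune on the prefix set, recurse group by group, positions by mixed radix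
def pvDfs (rs : List (List String)) (prefixes : PySem.Set String) (target lo hi : Int) :
    List (List String) → Int → List Char → List String → List (Int × String) → List (Int × String)
  | groups, base, prefx, words, acc =>
    if target ≤ (acc.length : Int) then acc
    else if String.ofList (PySem.Chars.lower prefx) ∈ prefixes then
      match groups with
      | [] =>
        if lo ≤ base ∧ base < hi then acc ++ [(base, pvRender rs (String.ofList prefx) words)]
        else acc
      | g :: rest =>
        let step := pvBlock rest
        g.zipIdx.foldl (fun a wj =>
          pvDfs rs prefixes target lo hi rest (base + (wj.2 : Int) * step)
            (prefx ++ [pvHeadUpper wj.1]) (words ++ [wj.1]) a) acc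
    else acc

-- Source B's `for perm in permutations(...)` loop with its two break conditions
def pvPermLoop (rs : List (List String)) (prefixes : PySem.Set String) (target lo hi total : Int) :
    List (List (List String)) → Int → List (Int × String) → List (Int × String)
  | [], _, acc => acc
  | p :: ps, base, acc =>
    if target ≤ (acc.length : Int) ∨ hi ≤ base then acc
    else pvPermLoop rs prefixes target lo hi total ps (base + total)
          (pvDfs rs prefixes target lo hi p base [] [] acc)

-- Source B's final `if len(acc) >= target: ... else: ...`
def pvFinish (target offset consumed : Int) (acc : List (Int × String)) : List String × Int :=
  if target ≤ (acc.length : Int) then (acc.map Prod.snd, (acc.getLastD (0, "")).1 + 1)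
  else (acc.map Prod.snd, offset + consumed)

def generate_acronyms_heavy_alt (revised_synonyms : List (List String)) (ordered : String) (offset : Int) (limit : Int) (spell : List String) : List String × Int :=
  let k := revised_synonyms.length
  let target : Int := if 1 < limit then limit else 1
  let prefixes := pvPrefixes spell k
  let total := pvBlock revised_synonyms
  if total = 0 then ([], offset)  -- no tuples at all
  else if ordered = "yes" then
    let acc := pvDfs revised_synonyms prefixes target offset total revised_synonyms 0 [] [] []
    let consumed := if offset < total then total - offset else 0
    pvFinish target offset consumed acc
  else
    let hi := offset + 1000000
    let nperms := (PySem.List.pyRange 2 ((k : Int) + 1) 1).foldl (fun t i => t * i) 1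
    let acc := pvPermLoop revised_synonyms prefixes target offset hi total
                (PySem.List.permutations revised_synonyms k) 0 []
    let capped := if hi < nperms * total then hi else nperms * total
    let consumed := if offset < capped then capped - offset else 0
    pvFinish target offset consumed acc

-- ===== PRECONDITION & SPEC =====

-- Pre_ excludes offset < 0 (islice raises ValueError) and empty synonym words
-- (word[0] raises IndexError whenever such a tuple is reached); empty words are harmless
-- (and admitted) when some group is empty, since then no tuple is ever produced.
def Pre_generate_acronyms_heavy (revised_synonyms : List (List String)) (ordered : String) (offset : Int) (limit : Int) (spell : List String) : Prop :=
  0 ≤ offset ∧ ((∃ g ∈ revised_synonyms, g = []) ∨ ∀ g ∈ revised_synonyms, ∀ w ∈ g, w ≠ "")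
instance (revised_synonyms : List (List String)) (ordered : String) (offset : Int) (limit : Int) (spell : List String) : Decidable (Pre_generate_acronyms_heavy revised_synonyms ordered offset limit spell) := by unfold Pre_generate_acronyms_heavy; infer_instance

def pvWitness_generate_acronyms_heavy : List (List String) × String × Int × Int × List String :=
  ([["cat", "feline"], ["toy", "ball"]], "yes", 0, 30, ["ct", "cb"])

def Spec_generate_acronyms_heavy (revised_synonyms : List (List String)) (ordered : String) (offset : Int) (limit : Int) (spell : List String) (out : List String × Int) : Prop := out = generate_acronyms_heavy_alt revised_synonyms ordered offset limit spell
instance (revised_synonyms : List (List String)) (ordered : String) (offset : Int) (limit : Int) (spell : List String) (out : List String × Int) : Decidable (Spec_generate_acronyms_heavy revised_synonyms ordered offset limit spell out) := by unfold Spec_generate_acronyms_heavy; infer_instance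

-- ===== CLAIM (what is proved, stated in full; the proofs are below) =====
def Claim_equal_generate_acronyms_heavy : Prop := ∀ (revised_synonyms : List (List String)) (ordered : String) (offset : Int) (limit : Int) (spell : List String), Dom_generate_acronyms_heavy revised_synonyms ordered offset limit spell → Pre_generate_acronyms_heavy revised_synonyms ordered offset limit spell → Spec_generate_acronyms_heavy revised_synonyms ordered offset limit spell (generate_acronyms_heavy revised_synonyms ordered offset limit spell)

-- ===== LEMMAS AND PROOFS =====

theorem pv_witness_ok :
    Dom_generate_acronyms_heavy (pvWitness_generate_acronyms_heavy.1) (pvWitness_generate_acronyms_heavy.2.1) (pvWitness_generate_acronyms_heavy.2.2.1) (pvWitness_generate_acronyms_heavy.2.2.2.1) (pvWitness_generate_acronyms_heavy.2.2.2.2) ∧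
    Pre_generate_acronyms_heavy (pvWitness_generate_acronyms_heavy.1) (pvWitness_generate_acronyms_heavy.2.1) (pvWitness_generate_acronyms_heavy.2.2.1) (pvWitness_generate_acronyms_heavy.2.2.2.1) (pvWitness_generate_acronyms_heavy.2.2.2.2) := by
  decide


-- ---------- proof-layer spec spine ----------

-- valid items of a tuple list, with running (global) positions, restricted to window [lo, hi)
def pvW (f : List String → Option String) (lo hi : Int) :
    List (List String) → Int → List (Int × String)
  | [], _ => []
  | t :: ts, p =>
    (if lo ≤ p ∧ p < hi then (match f t with | some r => [(p, r)] | none => []) else [])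
      ++ pvW f lo hi ts (p + 1)

-- same without a window
def pvVno (f : List String → Option String) :
    List (List String) → Int → List (Int × String)
  | [], _ => []
  | t :: ts, p => (match f t with | some r => [(p, r)] | none => []) ++ pvVno f ts (p + 1)

-- validity/render of a full tuple below a fixed dfs node
def pvGenOf (rs : List (List String)) (prefixes : PySem.Set String)
    (prefx : List Char) (words : List String) (t : List String) : Option String :=
  if String.ofList (PySem.Chars.lower (prefx ++ t.map pvHeadUpper)) ∈ prefixes then
    some (pvRender rs (String.ofList (prefx ++ t.map pvHeadUpper)) (words ++ t))
  else none

-- common shape of both programs' results (m = how many valid items are still wanted)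
def pvAfter (acc : List String) (m : Nat) (k : Int) (len : Nat) (V : List (Int × String)) :
    List String × Int :=
  if m ≤ V.length then
    (acc ++ (V.take m).map Prod.snd, ((V.take m).getLastD (0, "")).1 + 1)
  else (acc ++ V.map Prod.snd, k + (len : Int))

-- per-permutation segments of the unordered stream
def pvWperms (f : List String → Option String) (lo hi total : Int) :
    List (List (List String)) → Int → List (Int × String)
  | [], _ => []
  | p :: ps, base => pvW f lo hi (pvProduct p) base ++ pvWperms f lo hi total ps (base + total)

-- ---------- generic pvW / pvVno lemmas ----------

theorem pvW_append (f : List String → Option String) (lo hi : Int) (as bs : List (List String)) (p : Int) :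
    pvW f lo hi (as ++ bs) p = pvW f lo hi as p ++ pvW f lo hi bs (p + (as.length : Int)) := by
  induction as generalizing p with
  | nil => simp [pvW]
  | cons a as ih =>
    simp only [List.cons_append, pvW, ih, List.append_assoc, List.length_cons]
    have : p + 1 + (as.length : Int) = p + ((as.length : Int) + 1) := by ring
    rw [this]
    push_cast
    ring_nf

theorem pvW_map_cons (f : List String → Option String) (lo hi : Int) (w : String)
    (ts : List (List String)) (p : Int) :
    pvW f lo hi (ts.map (fun t => w :: t)) p = pvW (fun t => f (w :: t)) lo hi ts p := by
  induction ts generalizing p with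
  | nil => simp [pvW]
  | cons t ts ih => simp only [List.map_cons, pvW, ih]

theorem pvW_nil_of_hi_le (f : List String → Option String) (lo hi : Int)
    (ts : List (List String)) (p : Int) (h : hi ≤ p) : pvW f lo hi ts p = [] := by
  induction ts generalizing p with
  | nil => simp [pvW]
  | cons t ts ih =>
    simp only [pvW]
    rw [if_neg (by omega), ih (p + 1) (by omega)]
    simp

theorem pvW_congr_mem (f g : List String → Option String) (lo hi : Int)
    (ts : List (List String)) (p : Int) (h : ∀ t ∈ ts, f t = g t) :
    pvW f lo hi ts p = pvW g lo hi ts p := by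
  induction ts generalizing p with
  | nil => simp [pvW]
  | cons t ts ih =>
    simp only [pvW]
    rw [h t (by simp), ih (p + 1) (fun t ht => h t (by simp [ht]))]

theorem pvW_nil_of_none (f : List String → Option String) (lo hi : Int)
    (ts : List (List String)) (p : Int) (h : ∀ t ∈ ts, f t = none) : pvW f lo hi ts p = [] := by
  induction ts generalizing p with
  | nil => simp [pvW]
  | cons t ts ih =>
    simp only [pvW]
    rw [h t (by simp), ih (p + 1) (fun t ht => h t (by simp [ht]))]
    simp

theorem pvW_drop (f : List String → Option String) (lo hi : Int)
    (ts : List (List String)) (p : Int) (d : Nat) (h : p + (d : Int) ≤ lo) :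
    pvW f lo hi ts p = pvW f lo hi (ts.drop d) (p + (d : Int)) := by
  induction d generalizing ts p with
  | zero => simp
  | succ d ih =>
    match ts with
    | [] => simp [pvW]
    | t :: ts =>
      simp only [pvW, List.drop_succ_cons]
      rw [if_neg (by omega)]
      have := ih ts (p + 1) (by push_cast; omega)
      rw [List.nil_append, this]
      congr 1
      push_cast
      ring

theorem pvW_take (f : List String → Option String) (lo hi : Int)
    (ts : List (List String)) (p : Int) (h : lo ≤ p) :
    pvW f lo hi ts p = pvVno f (ts.take (hi - p).toNat) p := by
  induction ts generalizing p with
  | nil => simp [pvW, pvVno]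
  | cons t ts ih =>
    by_cases hp : p < hi
    · have h2 : (hi - p).toNat = (hi - (p + 1)).toNat + 1 := by omega
      rw [h2]
      simp only [pvW, List.take_succ_cons, pvVno]
      rw [if_pos ⟨h, hp⟩, ih (p + 1) (by omega)]
    · have h2 : (hi - p).toNat = 0 := by omega
      rw [h2]
      simp only [List.take_zero, pvVno]
      exact pvW_nil_of_hi_le f lo hi (t :: ts) p (by omega)

-- ---------- sizes ----------

theorem pvBlock_foldl (gs : List (List String)) (t : Int) :
    gs.foldl (fun t g => t * (g.length : Int)) t = t * ((gs.map List.length).prod : Nat) := by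
  induction gs generalizing t with
  | nil => simp
  | cons g gs ih =>
    simp only [List.foldl_cons, ih, List.map_cons, List.prod_cons]
    push_cast
    ring

theorem pvBlock_eq (gs : List (List String)) :
    pvBlock gs = (((gs.map List.length).prod : Nat) : Int) := by
  simpa using pvBlock_foldl gs 1

theorem pvProduct_length (gs : List (List String)) :
    (pvProduct gs).length = (gs.map List.length).prod := by
  induction gs with
  | nil => simp [pvProduct]
  | cons g gs ih =>
    simp only [pvProduct, List.length_flatMap, List.length_map, List.map_cons, List.prod_cons]
    trans (g.map (fun _ => (pvProduct gs).length)).sum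
    · rfl
    · rw [List.map_const', List.sum_replicate, smul_eq_mul, ih]

theorem pvBlock_nonneg (gs : List (List String)) : 0 ≤ pvBlock gs := by
  rw [pvBlock_eq]
  positivity

theorem pvProduct_mem_length (gs : List (List String)) (t : List String) (h : t ∈ pvProduct gs) :
    t.length = gs.length := by
  induction gs generalizing t with
  | nil => simp_all [pvProduct]
  | cons g gs ih =>
    simp only [pvProduct, List.mem_flatMap, List.mem_map] at h
    obtain ⟨w, _, t', ht', rfl⟩ := h
    simp [ih t' ht']

theorem pvPermutations_length (xs : List (List String)) :
    (PySem.List.permutations xs xs.length).length = Nat.factorial xs.length := by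
  suffices h : ∀ (n : Nat) (xs : List (List String)), xs.length = n →
      (PySem.List.permutations xs n).length = Nat.factorial n by
    exact h xs.length xs rfl
  intro n
  induction n with
  | zero => intro xs _; rw [PySem.List.permutations]; rfl
  | succ n ih =>
    intro xs hxs
    rw [PySem.List.permutations, List.length_flatMap]
    trans ((List.range xs.length).map (fun _ => Nat.factorial n)).sum
    · congr 1
      apply List.map_congr_left
      intro i hi
      rw [List.mem_range] at hi
      rw [List.getElem?_eq_getElem hi]
      simp only [List.length_map]
      apply ih
      rw [List.length_eraseIdx, if_pos hi]
      omega
    · rw [List.map_const', List.sum_replicate, smul_eq_mul, List.length_range, hxs,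
        Nat.factorial_succ]

theorem pvNperms_eq (k : Nat) :
    (PySem.List.pyRange 2 ((k : Int) + 1) 1).foldl (fun t i => t * i) 1
      = ((Nat.factorial k : Nat) : Int) := by
  induction k with
  | zero =>
    norm_num
  | succ k ih =>
    rcases Nat.eq_zero_or_pos k with hk | hk
    · subst hk
      norm_num
    · have hstep : PySem.List.pyRange 2 (((k + 1 : Nat) : Int) + 1) 1
          = PySem.List.pyRange 2 ((k : Int) + 1) 1 ++ [((k : Int) + 1)] := by
        have := PySem.List.pyRange_one_succ_right (a := 2) (b := (k : Int) + 1) (by omega)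
        simpa using this
      rw [hstep, List.foldl_append, ih]
      simp only [List.foldl_cons, List.foldl_nil, Nat.factorial_succ]
      push_cast
      ring

-- ---------- prefix-set characterisation ----------

theorem pv_mem_foldl_add (l : List Nat) (g : Nat → String) (s0 : PySem.Set String) (x : String) :
    x ∈ l.foldl (fun s i => PySem.Set.add s (g i)) s0 ↔ x ∈ s0 ∨ ∃ i ∈ l, x = g i := by
  induction l generalizing s0 with
  | nil => simp
  | cons a l ih =>
    simp only [List.foldl_cons, ih, PySem.Set.mem_add, List.mem_cons]
    constructor
    · rintro ((h | h) | ⟨i, hi, rfl⟩)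
      · exact Or.inl h
      · exact Or.inr ⟨a, Or.inl rfl, h⟩
      · exact Or.inr ⟨i, Or.inr hi, rfl⟩
    · rintro (h | ⟨i, (rfl | hi), rfl⟩)
      · exact Or.inl (Or.inl h)
      · exact Or.inl (Or.inr rfl)
      · exact Or.inr ⟨i, hi, rfl⟩

theorem pvPrefixes_mem_aux (spell : List String) (k : Nat) (s0 : PySem.Set String) (x : String) :
    x ∈ spell.foldl (fun s w =>
      if w.toList.length = k then
        (List.range (k + 1)).foldl (fun s i => PySem.Set.add s (String.ofList (w.toList.take i))) s
      else s) s0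
    ↔ x ∈ s0 ∨ ∃ w ∈ spell, w.toList.length = k ∧ ∃ i ≤ k, x = String.ofList (w.toList.take i) := by
  induction spell generalizing s0 with
  | nil => simp
  | cons w spell ih =>
    simp only [List.foldl_cons, ih, List.mem_cons]
    by_cases hw : w.toList.length = k
    · rw [if_pos hw]
      simp only [pv_mem_foldl_add, List.mem_range]
      constructor
      · rintro ((h | ⟨i, hi, rfl⟩) | ⟨v, hv, hk, i, hik, rfl⟩)
        · exact Or.inl h
        · exact Or.inr ⟨w, Or.inl rfl, hw, i, by omega, rfl⟩
        · exact Or.inr ⟨v, Or.inr hv, hk, i, hik, rfl⟩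
      · rintro (h | ⟨v, (rfl | hv), hk, i, hik, rfl⟩)
        · exact Or.inl (Or.inl h)
        · exact Or.inl (Or.inr ⟨i, by omega, rfl⟩)
        · exact Or.inr ⟨v, hv, hk, i, hik, rfl⟩
    · rw [if_neg hw]
      constructor
      · rintro (h | ⟨v, hv, hk, i, hik, rfl⟩)
        · exact Or.inl h
        · exact Or.inr ⟨v, Or.inr hv, hk, i, hik, rfl⟩
      · rintro (h | ⟨v, (rfl | hv), hk, i, hik, rfl⟩)
        · exact Or.inl h
        · exact absurd hk hw
        · exact Or.inr ⟨v, hv, hk, i, hik, rfl⟩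


theorem pvPrefixes_mem (spell : List String) (k : Nat) (x : String) :
    x ∈ pvPrefixes spell k ↔
      ∃ w ∈ spell, w.toList.length = k ∧ ∃ i ≤ k, x = String.ofList (w.toList.take i) := by
  unfold pvPrefixes
  rw [pvPrefixes_mem_aux]
  simp [PySem.Set.empty]

-- full-length membership = spell membership
theorem pvPrefixes_full (spell : List String) (k : Nat) (s : List Char) (h : s.length = k) :
    String.ofList s ∈ pvPrefixes spell k ↔ String.ofList s ∈ spell := by
  rw [pvPrefixes_mem]
  constructor
  · rintro ⟨w, hw, hk, i, hik, he⟩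
    have hs : s = w.toList.take i := String.ofList_inj.mp he
    have hlen : s.length = min i w.toList.length := by rw [hs, List.length_take]
    have : i = k := by omega
    subst this
    have : w.toList.take i = w.toList := List.take_of_length_le (by omega)
    rw [hs, this, String.ofList_toList]
    exact hw
  · intro hs
    refine ⟨String.ofList s, hs, ?_, k, le_refl k, ?_⟩
    · rw [String.toList_ofList]; exact h
    · rw [String.toList_ofList, List.take_of_length_le (by omega)]

-- downward closure: a prefix of a member (after lower) is a member
theorem pvPrefixes_closed (spell : List String) (k : Nat) (l l' : List Char)
    (h : String.ofList (PySem.Chars.lower (l ++ l')) ∈ pvPrefixes spell k) :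
    String.ofList (PySem.Chars.lower l) ∈ pvPrefixes spell k := by
  rw [pvPrefixes_mem] at h ⊢
  obtain ⟨w, hw, hk, i, hik, he⟩ := h
  have hs : PySem.Chars.lower (l ++ l') = w.toList.take i := String.ofList_inj.mp he
  rw [PySem.Chars.lower, List.map_append] at hs
  refine ⟨w, hw, hk, min l.length i, by omega, ?_⟩
  have h1 : PySem.Chars.lower l
      = (List.map PySem.Chars.lowerChar l ++ List.map PySem.Chars.lowerChar l').take l.length := by
    rw [← List.length_map (f := PySem.Chars.lowerChar) (as := l), List.take_left]
    rfl
  congr 1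
  rw [h1, hs, List.take_take]

-- ---------- A-side loop characterisation ----------

theorem pvAfter_skip (acc : List String) (m : Nat) (k : Int) (len : Nat)
    (V : List (Int × String)) :
    pvAfter acc m (k + 1) len V = pvAfter acc m k (len + 1) V := by
  unfold pvAfter
  split
  · rfl
  · simp only [Prod.mk.injEq, true_and]
    push_cast
    ring

theorem pvAfter_one (acc : List String) (r : String) (k : Int) (len : Nat)
    (V : List (Int × String)) :
    pvAfter acc 1 k len ((k, r) :: V) = (acc ++ [r], k + 1) := by
  unfold pvAfter
  rw [if_pos (by simp)]
  simp

theorem pvAfter_step (acc : List String) (r : String) (m' : Nat) (k : Int) (len : Nat)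
    (V : List (Int × String)) (h1 : 1 ≤ m') :
    pvAfter (acc ++ [r]) m' (k + 1) len V = pvAfter acc (m' + 1) k (len + 1) ((k, r) :: V) := by
  unfold pvAfter
  by_cases hV : m' ≤ V.length
  · rw [if_pos hV, if_pos (by simp; omega)]
    simp only [List.take_succ_cons, List.map_cons, Prod.mk.injEq]
    constructor
    · simp
    · congr 1
      rcases hVt : V.take m' with _ | ⟨y, ys⟩
      · exfalso
        have := congrArg List.length hVt
        rw [List.length_take] at this
        simp only [List.length_nil] at this
        omega
      · simp
  · rw [if_neg hV, if_neg (by simp; omega)]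
    simp only [List.map_cons, Prod.mk.injEq]
    constructor
    · simp
    · push_cast
      ring

theorem pvLoopA_spec (rs : List (List String)) (spell : List String) (limit : Int)
    (target : Int) (htarget : target = if 1 < limit then limit else 1)
    (ts : List (List String)) (acc : List String) (k : Int)
    (hacc : (acc.length : Int) < target) :
    pvLoopA rs spell limit ts acc k
      = pvAfter acc ((target - (acc.length : Int)).toNat) k ts.length
          (pvVno (pvGenAcronym rs spell) ts k) := by
  induction ts generalizing acc k with
  | nil =>
    simp only [pvLoopA, pvVno, pvAfter, List.length_nil]
    rw [if_neg (by simp; omega)]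
    simp
  | cons t ts ih =>
    simp only [pvLoopA, pvVno]
    cases hgen : pvGenAcronym rs spell t with
    | none =>
      dsimp only
      rw [ih acc (k + 1) hacc, pvAfter_skip, List.length_cons]
      rfl
    | some r =>
      dsimp only
      have hcond : (limit ≤ ((acc ++ [r]).length : Int)) ↔ (target ≤ (acc.length : Int) + 1) := by
        rw [htarget]; simp only [List.length_append, List.length_cons, List.length_nil]
        push_cast
        split_ifs <;> omega
      by_cases hstop : target ≤ (acc.length : Int) + 1
      · rw [if_pos (hcond.mpr hstop)]
        have hm : (target - (acc.length : Int)).toNat = 1 := by omega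
        rw [List.singleton_append, hm, pvAfter_one]
      · rw [if_neg (fun hc => hstop (hcond.mp hc))]
        rw [ih (acc ++ [r]) (k + 1) (by simp; omega)]
        have hm1 : (target - ((acc ++ [r]).length : Int)).toNat
            = (target - (acc.length : Int)).toNat - 1 := by simp; omega
        have hm2 : ((target - (acc.length : Int)).toNat - 1) + 1
            = (target - (acc.length : Int)).toNat := by omega
        rw [hm1, List.singleton_append,
          pvAfter_step acc r _ k ts.length _ (by omega), hm2, List.length_cons]

-- ---------- B-side dfs characterisation ----------

theorem pvGenOf_cons (rs : List (List String)) (prefixes : PySem.Set String)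
    (prefx : List Char) (words : List String) (w : String) (t : List String) :
    pvGenOf rs prefixes prefx words (w :: t)
      = pvGenOf rs prefixes (prefx ++ [pvHeadUpper w]) (words ++ [w]) t := by
  simp [pvGenOf, List.append_assoc]

theorem pvWperms_nil_of_hi_le (f : List String → Option String) (lo hi total : Int)
    (htotal : 0 ≤ total) (perms : List (List (List String))) (base : Int) (h : hi ≤ base) :
    pvWperms f lo hi total perms base = [] := by
  induction perms generalizing base with
  | nil => rfl
  | cons p ps ih =>
    simp only [pvWperms]
    rw [pvW_nil_of_hi_le f lo hi _ base h, ih (base + total) (by omega)]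
    rfl

theorem pvDfs_prune (rs : List (List String)) (prefixes : PySem.Set String)
    (prefx : List Char) (words : List String)
    (h : String.ofList (PySem.Chars.lower prefx) ∉ prefixes) (lo hi : Int)
    (hcl : ∀ l l' : List Char, String.ofList (PySem.Chars.lower (l ++ l')) ∈ prefixes →
            String.ofList (PySem.Chars.lower l) ∈ prefixes)
    (ts : List (List String)) (p : Int) :
    pvW (pvGenOf rs prefixes prefx words) lo hi ts p = [] := by
  apply pvW_nil_of_none
  intro t _
  unfold pvGenOf
  rw [if_neg]
  intro hmem
  exact h (hcl prefx (t.map pvHeadUpper) hmem)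

theorem pvDfs_spec (rs : List (List String)) (prefixes : PySem.Set String)
    (target lo hi : Int)
    (hcl : ∀ l l' : List Char, String.ofList (PySem.Chars.lower (l ++ l')) ∈ prefixes →
            String.ofList (PySem.Chars.lower l) ∈ prefixes)
    (groups : List (List String)) (base : Int) (prefx : List Char) (words : List String)
    (acc : List (Int × String)) :
    pvDfs rs prefixes target lo hi groups base prefx words acc
      = acc ++ (pvW (pvGenOf rs prefixes prefx words) lo hi (pvProduct groups) base).take
          ((target - (acc.length : Int)).toNat) := by
  induction groups generalizing base prefx words acc with
  | nil =>
    rw [pvDfs]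
    by_cases h1 : target ≤ (acc.length : Int)
    · rw [if_pos h1]
      have hm : (target - (acc.length : Int)).toNat = 0 := by omega
      rw [hm, List.take_zero, List.append_nil]
    · rw [if_neg h1]
      by_cases h2 : String.ofList (PySem.Chars.lower prefx) ∈ prefixes
      · rw [if_pos h2]
        have hf : pvGenOf rs prefixes prefx words []
            = some (pvRender rs (String.ofList prefx) words) := by
          simp [pvGenOf, if_pos h2]
        simp only [pvProduct, pvW, hf]
        by_cases h3 : lo ≤ base ∧ base < hi
        · rw [if_pos h3, if_pos h3, List.append_nil,
            List.take_of_length_le (by simp; omega)]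
        · rw [if_neg h3, if_neg h3]
          simp
      · rw [if_neg h2]
        rw [pvDfs_prune rs prefixes prefx words h2 lo hi hcl, List.take_nil, List.append_nil]
  | cons g rest ih =>
    rw [pvDfs]
    by_cases h1 : target ≤ (acc.length : Int)
    · rw [if_pos h1]
      have hm : (target - (acc.length : Int)).toNat = 0 := by omega
      rw [hm, List.take_zero, List.append_nil]
    · rw [if_neg h1]
      by_cases h2 : String.ofList (PySem.Chars.lower prefx) ∈ prefixes
      · rw [if_pos h2]
        dsimp only
        have hlen : ((pvProduct rest).length : Int) = pvBlock rest := by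
          rw [pvBlock_eq, pvProduct_length]
        have row : ∀ (g' : List String) (j : Nat) (acc : List (Int × String)),
            (g'.zipIdx j).foldl (fun a wj =>
              pvDfs rs prefixes target lo hi rest (base + (wj.2 : Int) * pvBlock rest)
                (prefx ++ [pvHeadUpper wj.1]) (words ++ [wj.1]) a) acc
            = acc ++ (pvW (pvGenOf rs prefixes prefx words) lo hi
                (g'.flatMap (fun w => (pvProduct rest).map (fun t => w :: t)))
                (base + (j : Int) * pvBlock rest)).take ((target - (acc.length : Int)).toNat) := by
          intro g'
          induction g' with
          | nil => intro j acc; simp [pvW]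
          | cons w g' ihrow =>
            intro j acc
            rw [List.zipIdx_cons, List.foldl_cons]
            dsimp only
            rw [ih (base + (j : Int) * pvBlock rest) (prefx ++ [pvHeadUpper w]) (words ++ [w]) acc]
            rw [ihrow (j + 1) _]
            rw [List.flatMap_cons, pvW_append, pvW_map_cons,
              pvW_congr_mem _ _ lo hi _ _
                (fun t _ => (pvGenOf_cons rs prefixes prefx words w t).symm)]
            have hpos : base + ((j : Int)) * pvBlock rest + (((pvProduct rest).map (fun t => w :: t)).length : Int)
                = base + (((j + 1 : Nat) : Int)) * pvBlock rest := by
              rw [List.length_map, hlen]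
              push_cast
              ring
            rw [hpos, List.take_append, ← List.append_assoc]
            congr 1
            congr 1
            simp only [List.length_append, List.length_take]
            omega
        have h0 := row g 0 acc
        rw [show pvProduct (g :: rest)
            = g.flatMap (fun w => (pvProduct rest).map (fun t => w :: t)) from rfl]
        simpa using h0
      · rw [if_neg h2]
        rw [pvDfs_prune rs prefixes prefx words h2 lo hi hcl, List.take_nil, List.append_nil]

theorem pvPermLoop_spec (rs : List (List String)) (prefixes : PySem.Set String)
    (target lo hi total : Int) (htotal : 0 ≤ total)
    (hcl : ∀ l l' : List Char, String.ofList (PySem.Chars.lower (l ++ l')) ∈ prefixes →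
            String.ofList (PySem.Chars.lower l) ∈ prefixes)
    (perms : List (List (List String))) (base : Int) (acc : List (Int × String)) :
    pvPermLoop rs prefixes target lo hi total perms base acc
      = acc ++ (pvWperms (pvGenOf rs prefixes [] []) lo hi total perms base).take
          ((target - (acc.length : Int)).toNat) := by
  induction perms generalizing base acc with
  | nil => simp [pvPermLoop, pvWperms]
  | cons p ps ih =>
    rw [pvPermLoop]
    by_cases h1 : target ≤ (acc.length : Int) ∨ hi ≤ base
    · rw [if_pos h1]
      rcases h1 with h1 | h1
      · have hm : (target - (acc.length : Int)).toNat = 0 := by omega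
        rw [hm, List.take_zero, List.append_nil]
      · rw [pvWperms_nil_of_hi_le _ lo hi total htotal _ base h1, List.take_nil,
          List.append_nil]
    · rw [if_neg h1]
      rw [pvDfs_spec rs prefixes target lo hi hcl p base [] [] acc]
      rw [ih (base + total) _]
      simp only [pvWperms]
      rw [List.take_append, ← List.append_assoc]
      congr 1
      congr 1
      simp only [List.length_append, List.length_take]
      omega

theorem pvWperms_flat (f : List String → Option String) (lo hi total : Int)
    (perms : List (List (List String))) (base : Int)
    (hlen : ∀ p ∈ perms, ((pvProduct p).length : Int) = total) :
    pvWperms f lo hi total perms base = pvW f lo hi (perms.flatMap (fun p => pvProduct p)) base := by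
  induction perms generalizing base with
  | nil => rfl
  | cons p ps ih =>
    simp only [pvWperms, List.flatMap_cons, pvW_append]
    rw [hlen p (by simp), ih (base + total) (fun q hq => hlen q (by simp [hq]))]

-- ---------- bridging the two validity tests ----------

theorem pvGenOf_nil (rs : List (List String)) (spell : List String) (t : List String)
    (hlen : t.length = rs.length) :
    pvGenOf rs (pvPrefixes spell rs.length) [] [] t = pvGenAcronym rs spell t := by
  unfold pvGenOf pvGenAcronym
  simp only [List.nil_append]
  have hlow : (PySem.Chars.lower (t.map pvHeadUpper)).length = rs.length := by
    simp [PySem.Chars.lower, hlen]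
  rw [if_congr (pvPrefixes_full spell rs.length _ hlow) rfl rfl]

theorem pvFinish_after (target offset consumed : Int) (len : Nat) (V : List (Int × String))
    (h1 : 1 ≤ target) (hc : consumed = (len : Int)) :
    pvFinish target offset consumed (V.take target.toNat)
      = pvAfter [] target.toNat offset len V := by
  subst hc
  have hT : ((target.toNat : Nat) : Int) = target := Int.toNat_of_nonneg (by omega)
  unfold pvFinish pvAfter
  simp only [List.nil_append]
  by_cases hV : target.toNat ≤ V.length
  · rw [if_pos (by simp [List.length_take]; omega), if_pos hV]
  · rw [if_neg (by simp [List.length_take]; omega), if_neg hV,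
      List.take_of_length_le (by omega)]

-- ===== VERDICT (by name: the statement is the Claim_ definition above) =====
theorem generate_acronyms_heavy_spec : Claim_equal_generate_acronyms_heavy := by
  intro rs ordered offset limit spell _ hpre
  obtain ⟨hoff, -⟩ := hpre
  unfold Spec_generate_acronyms_heavy generate_acronyms_heavy generate_acronyms_heavy_alt
  dsimp only
  have hoffn : ((offset.toNat : Nat) : Int) = offset := Int.toNat_of_nonneg hoff
  have htar1 : 1 ≤ (if 1 < limit then limit else 1) := by split <;> omega
  have hcl : ∀ l l' : List Char,
      String.ofList (PySem.Chars.lower (l ++ l')) ∈ pvPrefixes spell rs.length →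
      String.ofList (PySem.Chars.lower l) ∈ pvPrefixes spell rs.length :=
    fun l l' h => pvPrefixes_closed spell rs.length l l' h
  have htotnn : 0 ≤ pvBlock rs := pvBlock_nonneg rs
  have hlenP : ((pvProduct rs).length : Int) = pvBlock rs := by
    rw [pvBlock_eq, pvProduct_length]
  by_cases htz : pvBlock rs = 0
  · rw [if_pos htz]
    have hP0 : pvProduct rs = [] := by
      have : ((pvProduct rs).length : Int) = 0 := by rw [hlenP, htz]
      exact List.length_eq_zero_iff.mp (by exact_mod_cast this)
    by_cases hord : ordered = "yes"
    · rw [if_pos hord, hP0]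
      simp [pvLoopA]
    · rw [if_neg hord]
      have hflat : (PySem.List.permutations rs rs.length).flatMap (fun p => pvProduct p) = [] := by
        rw [List.flatMap_eq_nil_iff]
        intro p hp
        have hperm := PySem.List.perm_of_mem_permutations hp
        have hbp : ((pvProduct p).length : Int) = 0 := by
          rw [pvBlock_eq] at htz
          rw [pvProduct_length, (hperm.map List.length).prod_eq]
          exact htz
        exact List.length_eq_zero_iff.mp (by exact_mod_cast hbp)
      rw [hflat]
      simp [pvLoopA]
  · rw [if_neg htz]
    by_cases hord : ordered = "yes"
    · -- ordered branch: single product, window [offset, total)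
      rw [if_pos hord, if_pos hord]
      rw [pvLoopA_spec rs spell limit _ rfl ((pvProduct rs).drop offset.toNat) [] offset
        (by simp; omega)]
      rw [pvDfs_spec rs (pvPrefixes spell rs.length) _ offset (pvBlock rs) hcl rs 0 [] [] []]
      simp only [List.length_nil, Nat.cast_zero, sub_zero, List.nil_append]
      have hV : pvW (pvGenOf rs (pvPrefixes spell rs.length) [] []) offset (pvBlock rs)
            (pvProduct rs) 0
          = pvVno (pvGenAcronym rs spell) ((pvProduct rs).drop offset.toNat) offset := by
        rw [pvW_congr_mem _ (pvGenAcronym rs spell) offset (pvBlock rs) (pvProduct rs) 0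
          (fun t ht => pvGenOf_nil rs spell t (pvProduct_mem_length rs t ht))]
        rw [pvW_drop _ offset (pvBlock rs) (pvProduct rs) 0 offset.toNat (by omega)]
        rw [show (0 : Int) + (offset.toNat : Int) = offset by omega]
        rw [pvW_take _ offset (pvBlock rs) _ offset (le_refl offset)]
        congr 1
        apply List.take_of_length_le
        have h1 := List.length_drop (l := pvProduct rs) (i := offset.toNat)
        omega
      rw [hV]
      have hcons : (if offset < pvBlock rs then pvBlock rs - offset else 0)
          = ((((pvProduct rs).drop offset.toNat).length : Nat) : Int) := by
        rw [List.length_drop]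
        split_ifs <;> omega
      rw [pvFinish_after _ offset _ (((pvProduct rs).drop offset.toNat).length) _ htar1 hcons]
    · -- unordered branch: permutation chain, window [offset, offset + 1000000)
      rw [if_neg hord, if_neg hord]
      rw [pvLoopA_spec rs spell limit _ rfl
        ((((PySem.List.permutations rs rs.length).flatMap (fun p => pvProduct p)).drop
            offset.toNat).take 1000000) [] offset (by simp; omega)]
      have hlenperm : ∀ p ∈ PySem.List.permutations rs rs.length,
          ((pvProduct p).length : Int) = pvBlock rs := by
        intro p hp
        have hperm := PySem.List.perm_of_mem_permutations hp
        rw [pvBlock_eq, pvProduct_length, (hperm.map List.length).prod_eq]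
      rw [pvPermLoop_spec rs (pvPrefixes spell rs.length) _ offset (offset + 1000000)
        (pvBlock rs) htotnn hcl (PySem.List.permutations rs rs.length) 0 []]
      simp only [List.length_nil, Nat.cast_zero, sub_zero, List.nil_append]
      rw [pvWperms_flat _ offset (offset + 1000000) (pvBlock rs) _ 0 hlenperm]
      have hV : pvW (pvGenOf rs (pvPrefixes spell rs.length) [] []) offset (offset + 1000000)
            ((PySem.List.permutations rs rs.length).flatMap (fun p => pvProduct p)) 0
          = pvVno (pvGenAcronym rs spell)
              ((((PySem.List.permutations rs rs.length).flatMap (fun p => pvProduct p)).drop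
                  offset.toNat).take 1000000) offset := by
        rw [pvW_congr_mem _ (pvGenAcronym rs spell) offset (offset + 1000000) _ 0 ?hmem]
        case hmem =>
          intro t ht
          rw [List.mem_flatMap] at ht
          obtain ⟨p, hp, htp⟩ := ht
          have hperm := PySem.List.perm_of_mem_permutations hp
          exact pvGenOf_nil rs spell t ((pvProduct_mem_length p t htp).trans hperm.length_eq)
        rw [pvW_drop _ offset (offset + 1000000) _ 0 offset.toNat (by omega)]
        rw [show (0 : Int) + (offset.toNat : Int) = offset by omega]
        rw [pvW_take _ offset (offset + 1000000) _ offset (le_refl offset)]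
        rw [show (offset + 1000000 - offset).toNat = 1000000 by omega]
      rw [hV]
      have hstream : ((((PySem.List.permutations rs rs.length).flatMap
            (fun p => pvProduct p)).length : Nat) : Int)
          = ((Nat.factorial rs.length : Nat) : Int) * pvBlock rs := by
        have hnat : ((PySem.List.permutations rs rs.length).flatMap (fun p => pvProduct p)).length
            = Nat.factorial rs.length * (pvProduct rs).length := by
          rw [List.length_flatMap]
          trans ((PySem.List.permutations rs rs.length).map
            (fun _ => (pvProduct rs).length)).sum
          · congr 1
            apply List.map_congr_left
            intro p hp
            have := hlenperm p hp
            rw [← hlenP] at this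
            exact_mod_cast this
          · rw [List.map_const', List.sum_replicate, smul_eq_mul, pvPermutations_length]
        rw [hnat]
        push_cast
        rw [hlenP]
      rw [pvNperms_eq rs.length]
      have hcons : (if offset <
            (if offset + 1000000 < ((Nat.factorial rs.length : Nat) : Int) * pvBlock rs
             then offset + 1000000
             else ((Nat.factorial rs.length : Nat) : Int) * pvBlock rs)
          then (if offset + 1000000 < ((Nat.factorial rs.length : Nat) : Int) * pvBlock rs
                then offset + 1000000
                else ((Nat.factorial rs.length : Nat) : Int) * pvBlock rs) - offset
          else 0)
          = ((((((PySem.List.permutations rs rs.length).flatMap (fun p => pvProduct p)).drop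
              offset.toNat).take 1000000).length : Nat) : Int) := by
        rw [List.length_take, List.length_drop]
        generalize hNT : ((Nat.factorial rs.length : Nat) : Int) * pvBlock rs = NT at hstream ⊢
        split_ifs <;> omega
      rw [pvFinish_after _ offset _
        ((((PySem.List.permutations rs rs.length).flatMap (fun p => pvProduct p)).drop
            offset.toNat).take 1000000).length _ htar1 hcons]
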